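-- pv_equiv track=rewrite | github.com/pypi-data/pypi-mirror-68 | packages/scaffan/scaffan-0.22.0.tar.gz/scaffan-0.22.0/scaffan/annotation.py | _get_annotation_elements
-- ===== SOURCE A (Python) =====
-- def _get_annotation_elements(annotations, element_keyword):
--     colors = {}
--     for i, an in enumerate(annotations):
--         title = an[element_keyword]
--         title = title.upper()
--         if title in colors:
--
--             colors[title].append(i)
--         else:
--             colors[title] = [i]
--
--     return colors
-- ===== SOURCE B (Python) =====
-- def _get_annotation_elements(annotations, element_keyword):
--     titles = [an[element_keyword].upper() for an in annotations]
--     return {t: [i for i, u in enumerate(titles) if u == t]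
--             for t in dict.fromkeys(titles)}
-- ===== Notes on version B (the rewrite author's own statement) =====
-- stated objective: alternative
-- what changed: Replaces the single-pass dict-accumulation loop (append-or-create per element) by a two-phase scheme: first extract all uppercased titles, then build the result with a dict comprehension over the first-occurrence-deduplicated titles, collecting each title's indices by a comprehension scan.
import Mathlib
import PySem

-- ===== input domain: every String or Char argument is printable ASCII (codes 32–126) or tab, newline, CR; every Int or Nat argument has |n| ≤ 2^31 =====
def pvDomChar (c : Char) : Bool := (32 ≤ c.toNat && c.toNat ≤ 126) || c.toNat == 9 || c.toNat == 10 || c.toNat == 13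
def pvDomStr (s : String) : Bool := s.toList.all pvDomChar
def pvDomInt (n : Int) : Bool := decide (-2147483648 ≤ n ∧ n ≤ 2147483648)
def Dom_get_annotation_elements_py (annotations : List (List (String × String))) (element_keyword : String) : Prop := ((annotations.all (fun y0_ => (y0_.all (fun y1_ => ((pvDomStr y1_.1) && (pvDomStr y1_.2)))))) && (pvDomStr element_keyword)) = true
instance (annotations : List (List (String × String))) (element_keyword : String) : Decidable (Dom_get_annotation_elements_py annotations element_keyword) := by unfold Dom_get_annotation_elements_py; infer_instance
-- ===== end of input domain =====

-- B groups indices by sorting nothing: it deduplicates the uppercased titles in first-occurrence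
-- order and collects each title's indices by a per-title scan, instead of A's single-pass
-- dict accumulation; objective: alternative decomposition (same result, no speed claim).


-- ===== PORT A =====
-- an[element_keyword]: dict lookup, first match in the association list; under Pre_ the key is
-- present, so the "" default is never used.
def pvKeyTitle (an : List (String × String)) (element_keyword : String) : String :=
  PySem.Str.upper ((PySem.Dict.mk an).getD element_keyword "")

def get_annotation_elements_py (annotations : List (List (String × String))) (element_keyword : String) : List (String × List Int) :=
  ((PySem.List.enumerate annotations).foldl
    (fun colors p =>
      let title := pvKeyTitle p.2 element_keyword
      if colors.contains title then
        colors.insert title (colors.getD title [] ++ [p.1])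
      else
        colors.insert title [p.1])
    PySem.Dict.empty).items

-- ===== PORT B =====
def get_annotation_elements_py_alt (annotations : List (List (String × String))) (element_keyword : String) : List (String × List Int) :=
  let titles := annotations.map (fun an => pvKeyTitle an element_keyword)
  (PySem.List.dedup titles).map
    (fun t => (t, (PySem.List.enumerate titles).filterMap
      (fun p => if p.2 = t then some p.1 else none)))

-- ===== PRECONDITION & SPEC =====
-- Pre_ excludes exactly the inputs on which A raises KeyError: some annotation lacks element_keyword.
def Pre_get_annotation_elements_py (annotations : List (List (String × String))) (element_keyword : String) : Prop :=
  (annotations.all (fun an => an.any (fun q => q.1 == element_keyword))) = true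
instance (annotations : List (List (String × String))) (element_keyword : String) : Decidable (Pre_get_annotation_elements_py annotations element_keyword) := by unfold Pre_get_annotation_elements_py; infer_instance

def pvWitness_get_annotation_elements_py : (List (List (String × String))) × String :=
  ([[("title", "a")], [("title", "A")]], "title")

def Spec_get_annotation_elements_py (annotations : List (List (String × String))) (element_keyword : String) (out : List (String × List Int)) : Prop := out = get_annotation_elements_py_alt annotations element_keyword
instance (annotations : List (List (String × String))) (element_keyword : String) (out : List (String × List Int)) : Decidable (Spec_get_annotation_elements_py annotations element_keyword out) := by unfold Spec_get_annotation_elements_py; infer_instance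

-- ===== CLAIM (what is proved, stated in full; the proofs are below) =====
def Claim_equal_get_annotation_elements_py : Prop := ∀ (annotations : List (List (String × String))) (element_keyword : String), Dom_get_annotation_elements_py annotations element_keyword → Pre_get_annotation_elements_py annotations element_keyword → Spec_get_annotation_elements_py annotations element_keyword (get_annotation_elements_py annotations element_keyword)

-- ===== LEMMAS AND PROOFS =====

-- A's if/else step is exactly Dict.modify with default [] (append-or-create).
theorem pvStepA_eq_modify (colors : PySem.Dict String (List Int)) (t : String) (i : Int) :
    (if colors.contains t then colors.insert t (colors.getD t [] ++ [i])
     else colors.insert t [i]) = colors.modify t [] (· ++ [i]) := by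
  by_cases h : colors.contains t = true
  · simp [h, PySem.Dict.modify]
  · simp only [Bool.not_eq_true] at h
    rw [PySem.Dict.modify, PySem.Dict.getD_of_not_contains _ _ h]
    simp [h]

-- enumerate commutes with map on the elements.
theorem pvEnumerate_map {α β : Type} (f : α → β) (xs : List α) (s : Int) :
    PySem.List.enumerate (xs.map f) s
      = (PySem.List.enumerate xs s).map (fun p => (p.1, f p.2)) := by
  induction xs generalizing s with
  | nil => simp [PySem.List.enumerate_nil]
  | cons x xs ih => simp [PySem.List.enumerate_cons, ih]

-- B's per-title index comprehension equals A's filtered pair list.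
theorem pvIndices_eq (ps : List (Int × List (String × String))) (kw t : String) :
    ((ps.map (fun p => (p.1, pvKeyTitle p.2 kw))).filterMap
        (fun p => if p.2 = t then some p.1 else none))
      = ((ps.map (fun p => (pvKeyTitle p.2 kw, p.1))).filter
          (fun p => p.1 == t)).map (fun p => p.2) := by
  induction ps with
  | nil => simp
  | cons p ps ih =>
    by_cases h : pvKeyTitle p.2 kw = t <;>
      simp [h, ih]

theorem get_annotation_elements_py_eq (annotations : List (List (String × String))) (element_keyword : String) :
    get_annotation_elements_py annotations element_keyword
      = get_annotation_elements_py_alt annotations element_keyword := by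
  unfold get_annotation_elements_py get_annotation_elements_py_alt
  -- rewrite A's step to modify, and the fold over enumerated annotations to a fold over (title, index) pairs
  have hstep :
      (PySem.List.enumerate annotations).foldl
        (fun colors p =>
          let title := pvKeyTitle p.2 element_keyword
          if colors.contains title then colors.insert title (colors.getD title [] ++ [p.1])
          else colors.insert title [p.1])
        PySem.Dict.empty
      = ((PySem.List.enumerate annotations).map
            (fun p => (pvKeyTitle p.2 element_keyword, p.1))).foldl
          (fun d q => d.modify q.1 [] (· ++ [q.2])) PySem.Dict.empty := by
    rw [List.foldl_map]
    refine PySem.List.foldl_congr_mem _ _ _ _ (fun d p _ => ?_)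
    simpa using pvStepA_eq_modify d (pvKeyTitle p.2 element_keyword) p.1
  rw [hstep]
  set l := (PySem.List.enumerate annotations).map
      (fun p => (pvKeyTitle p.2 element_keyword, p.1)) with hl
  have hfold_key :
      (l.foldl (fun d q => d.modify q.1 [] (· ++ [q.2])) PySem.Dict.empty)
      = (l.foldl (fun d q => d.modify (Prod.fst q) [] ((fun (_ : PySem.Dict String (List Int)) (q : String × Int) (v : List Int) => v ++ [q.2]) d q)) PySem.Dict.empty) := rfl
  have hnodup : ((l.foldl (fun d q => d.modify q.1 [] (· ++ [q.2])) PySem.Dict.empty)).keys.Nodup := by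
    rw [hfold_key]
    exact PySem.Dict.nodup_keys_foldl_modify_key l Prod.fst [] _ _ (by simp)
  have hkeys : ((l.foldl (fun d q => d.modify q.1 [] (· ++ [q.2])) PySem.Dict.empty)).keys
      = PySem.Set.ofList (l.map Prod.fst) := by
    rw [hfold_key, PySem.Dict.keys_foldl_modify_key]
    simp [PySem.Set.update, PySem.Set.ofList, PySem.Dict.keys_empty]
  have htitles : l.map Prod.fst
      = annotations.map (fun an => pvKeyTitle an element_keyword) := by
    rw [hl, List.map_map]
    have := PySem.List.map_snd_enumerate annotations 0
    calc (PySem.List.enumerate annotations).map (Prod.fst ∘ fun p => (pvKeyTitle p.2 element_keyword, p.1))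
        = ((PySem.List.enumerate annotations).map (fun p => p.2)).map (fun an => pvKeyTitle an element_keyword) := by
          rw [List.map_map]; rfl
      _ = annotations.map (fun an => pvKeyTitle an element_keyword) := by rw [this]
  dsimp only
  rw [PySem.Dict.items_eq_map_keys _ hnodup [], hkeys, htitles]
  rw [PySem.List.dedup_eq_ofList]
  refine List.map_congr_left (fun t ht => ?_)
  congr 1
  have hg : ((l.foldl (fun d q => d.modify q.1 [] (· ++ [q.2])) PySem.Dict.empty)).getD t []
      = ((l.filter (fun q => q.1 == t)).map (fun q => q.2)) := by
    have := PySem.Dict.getD_foldl_modify_append l PySem.Dict.empty t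
    simpa using this
  rw [hg, pvEnumerate_map]
  exact (pvIndices_eq (PySem.List.enumerate annotations 0) element_keyword t).symm

-- ===== VERDICT (by name: the statement is the Claim_ definition above) =====
theorem get_annotation_elements_py_spec : Claim_equal_get_annotation_elements_py := by
  intro annotations element_keyword _ _
  unfold Spec_get_annotation_elements_py
  exact get_annotation_elements_py_eq annotations element_keyword
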